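-- pv_equiv track=rewrite | github.com/gauravgpta93/Leetcode_2024 | arrays_and_hashing/36 Valid sudoku.py | check_valid_diagonal
-- ===== SOURCE A (Python) =====
-- def check_valid_diagonal(diagonal_index: int, board: list[list[str]]) -> bool:
--     row_seen = set()
--     column_seen = set()
--     for index in range(9):
--         row_value = board[diagonal_index][index]
--         column_value = board[index][diagonal_index]
--         if row_value in row_seen or column_value in column_seen:
--             return False
--         if row_value != ".":
--             row_seen.add(row_value)
--         if column_value != ".":
--             column_seen.add(column_value)
--     return True
-- ===== SOURCE B (Python) =====
-- def _has_dupes(values):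
--     filled = [v for v in values if v != "."]
--     return len(filled) != len(set(filled))
--
--
-- def check_valid_diagonal(diagonal_index: int, board: list[list[str]]) -> bool:
--     row_values = []
--     column_values = []
--     for index in range(9):
--         row_values.append(board[diagonal_index][index])
--         column_values.append(board[index][diagonal_index])
--         if _has_dupes(row_values) or _has_dupes(column_values):
--             return False
--     return True
-- ===== Notes on version B (the rewrite author's own statement) =====
-- stated objective: alternative
-- what changed: Replaced A's two incrementally maintained seen-sets (membership test then conditional add) by stateless growing prefix lists that are re-checked wholesale each step with a filter-then-count helper (len(filled) != len(set(filled))).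
import Mathlib
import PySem

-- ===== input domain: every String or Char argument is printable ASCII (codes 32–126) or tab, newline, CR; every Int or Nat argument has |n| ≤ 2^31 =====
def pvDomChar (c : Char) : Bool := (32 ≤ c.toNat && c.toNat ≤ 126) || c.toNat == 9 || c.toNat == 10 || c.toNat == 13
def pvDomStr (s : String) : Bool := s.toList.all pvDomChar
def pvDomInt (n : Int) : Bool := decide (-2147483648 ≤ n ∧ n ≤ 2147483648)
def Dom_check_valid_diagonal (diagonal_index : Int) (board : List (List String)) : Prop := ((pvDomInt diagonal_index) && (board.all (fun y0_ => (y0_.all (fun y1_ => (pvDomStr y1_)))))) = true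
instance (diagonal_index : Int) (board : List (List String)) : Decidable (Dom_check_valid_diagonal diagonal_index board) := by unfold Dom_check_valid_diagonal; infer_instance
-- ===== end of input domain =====

-- B replaces A's two incrementally maintained seen-sets by stateless growing prefix lists
-- re-checked wholesale each step with a filter-then-count helper; objective: alternative.

-- board[r][c]; the defaults are only reached outside Pre_ (where the Python raises IndexError)
def pvCell (board : List (List String)) (r c : Int) : String :=
  PySem.List.pyGetD (PySem.List.pyGetD board r []) c ""

-- ===== PORT A =====
-- the 'for index in range(9)' loop of A, carrying row_seen and column_seen, with early return False
def pvGoA (d : Int) (board : List (List String)) :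
    List Int → PySem.Set String → PySem.Set String → Bool
  | [], _, _ => true
  | i :: rest, row_seen, column_seen =>
    let row_value := pvCell board d i
    let column_value := pvCell board i d
    if PySem.Set.contains row_seen row_value || PySem.Set.contains column_seen column_value then
      false
    else
      pvGoA d board rest
        (if row_value ≠ "." then PySem.Set.add row_seen row_value else row_seen)
        (if column_value ≠ "." then PySem.Set.add column_seen column_value else column_seen)

def check_valid_diagonal (diagonal_index : Int) (board : List (List String)) : Bool :=
  pvGoA diagonal_index board (PySem.List.pyRange 0 9 1) PySem.Set.empty PySem.Set.empty

-- ===== PORT B =====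
def pvHasDupes (values : List String) : Bool :=
  let filled := values.filter (fun v => v ≠ ".")
  filled.length != (PySem.Set.ofList filled).length

-- B's loop, carrying the raw prefix lists row_values and column_values
def pvGoB (d : Int) (board : List (List String)) :
    List Int → List String → List String → Bool
  | [], _, _ => true
  | i :: rest, row_values, column_values =>
    let row_values' := row_values ++ [pvCell board d i]
    let column_values' := column_values ++ [pvCell board i d]
    if pvHasDupes row_values' || pvHasDupes column_values' then false
    else pvGoB d board rest row_values' column_values'

def check_valid_diagonal_alt (diagonal_index : Int) (board : List (List String)) : Bool :=
  pvGoB diagonal_index board (PySem.List.pyRange 0 9 1) [] []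

-- ===== PRECONDITION & SPEC =====
-- cell accesses of step i (both happen before step i's duplicate check), spelled on the raw input
def pvAcc (diagonal_index : Int) (board : List (List String)) (i : Nat) : Prop :=
  PySem.Raise.InRange board.length diagonal_index ∧
  PySem.Raise.InRange board.length (i : Int) ∧
  PySem.Raise.InRange (PySem.List.pyGetD board diagonal_index []).length (i : Int) ∧
  PySem.Raise.InRange (PySem.List.pyGetD board (i : Int) []).length diagonal_index

-- step k's duplicate check fires: its row value repeats an earlier non-'.' row value, or likewise for the column
def pvDupAt (diagonal_index : Int) (board : List (List String)) (k : Nat) : Prop :=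
  (PySem.List.pyGetD (PySem.List.pyGetD board diagonal_index []) (k : Int) "" ≠ "." ∧
    ∃ j ∈ List.range k, PySem.List.pyGetD (PySem.List.pyGetD board diagonal_index []) (j : Int) "" =
      PySem.List.pyGetD (PySem.List.pyGetD board diagonal_index []) (k : Int) "") ∨
  (PySem.List.pyGetD (PySem.List.pyGetD board (k : Int) []) diagonal_index "" ≠ "." ∧
    ∃ j ∈ List.range k, PySem.List.pyGetD (PySem.List.pyGetD board (j : Int) []) diagonal_index "" =
      PySem.List.pyGetD (PySem.List.pyGetD board (k : Int) []) diagonal_index "")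

-- Exactly the inputs where the Python A returns instead of raising IndexError: either every cell
-- the nine steps touch is accessible, or some accessible prefix already repeats a value, so the
-- early 'return False' is reached before the first inaccessible cell.
def Pre_check_valid_diagonal (diagonal_index : Int) (board : List (List String)) : Prop :=
  (∀ i ∈ List.range 9, pvAcc diagonal_index board i) ∨
  (∃ k ∈ List.range 9, (∀ i ∈ List.range (k + 1), pvAcc diagonal_index board i) ∧
    pvDupAt diagonal_index board k)

instance (diagonal_index : Int) (board : List (List String)) : Decidable (Pre_check_valid_diagonal diagonal_index board) := by
  unfold Pre_check_valid_diagonal pvAcc pvDupAt; infer_instance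

def pvWitness_check_valid_diagonal : Int × List (List String) :=
  (0, List.replicate 9 (List.replicate 9 "."))

def Spec_check_valid_diagonal (diagonal_index : Int) (board : List (List String)) (out : Bool) : Prop := out = check_valid_diagonal_alt diagonal_index board
instance (diagonal_index : Int) (board : List (List String)) (out : Bool) : Decidable (Spec_check_valid_diagonal diagonal_index board out) := by unfold Spec_check_valid_diagonal; infer_instance

-- ===== CLAIM (what is proved, stated in full; the proofs are below) =====
def Claim_equal_check_valid_diagonal : Prop := ∀ (diagonal_index : Int) (board : List (List String)), Dom_check_valid_diagonal diagonal_index board → Pre_check_valid_diagonal diagonal_index board → Spec_check_valid_diagonal diagonal_index board (check_valid_diagonal diagonal_index board)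

-- ===== LEMMAS AND PROOFS =====

theorem pvOfList_sublist (xs : List String) : (PySem.Set.ofList xs).Sublist xs := by
  induction xs using List.reverseRecOn with
  | nil => simp [PySem.Set.ofList_nil]
  | append_singleton ys y ih =>
    rw [PySem.Set.ofList_append_singleton, PySem.Set.add_eq_ite]
    split_ifs with h
    · exact ih.trans (List.sublist_append_left ys [y])
    · exact ih.append_right [y]

theorem pvHasDupes_false_iff (vs : List String) :
    pvHasDupes vs = false ↔ (vs.filter (fun v => v ≠ ".")).Nodup := by
  unfold pvHasDupes
  simp only [bne_eq_false_iff_eq]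
  constructor
  · intro h
    have he := (pvOfList_sublist (vs.filter (fun v => v ≠ "."))).eq_of_length (by simpa using h.symm)
    rw [← he]
    exact PySem.Set.nodup_ofList _
  · intro h
    rw [PySem.Set.ofList_eq_self_of_nodup _ h]

-- appending one value: B's whole-prefix recheck fires exactly when A's seen-set lookup does
theorem pvHasDupes_append (row : List String) (v : String)
    (h : (row.filter (fun v => v ≠ ".")).Nodup) :
    pvHasDupes (row ++ [v]) =
      PySem.Set.contains (PySem.Set.ofList (row.filter (fun v => v ≠ "."))) v := by
  rw [Bool.eq_iff_iff, ← Bool.not_eq_false, pvHasDupes_false_iff,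
    PySem.Set.contains_iff, PySem.Set.mem_ofList]
  simp only [ne_eq, decide_not] at h ⊢
  by_cases hv : v = "."
  · subst hv
    simp [List.filter_append, h]
  · simp only [List.filter_append, List.filter_cons, hv, decide_false, Bool.not_false,
      List.filter_nil]
    rw [List.nodup_append]
    simp [h, List.mem_filter, hv]

-- the seen-set A carries is exactly the deduplicated non-'.' part of the prefix B carries
theorem pvOfList_filter_append (row : List String) (v : String) :
    PySem.Set.ofList ((row ++ [v]).filter (fun v => v ≠ ".")) =
      (if v ≠ "." then PySem.Set.add (PySem.Set.ofList (row.filter (fun v => v ≠ "."))) v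
       else PySem.Set.ofList (row.filter (fun v => v ≠ "."))) := by
  by_cases hv : v = "."
  · subst hv
    simp [List.filter_append]
  · simp only [List.filter_append, List.filter_cons, ne_eq, hv, not_false_eq_true, decide_true,
      List.filter_nil, if_true]
    exact PySem.Set.ofList_append_singleton _ _

theorem pvGoA_eq_goB (d : Int) (board : List (List String)) :
    ∀ (idxs : List Int) (row col : List String),
      pvHasDupes row = false → pvHasDupes col = false →
      pvGoA d board idxs
        (PySem.Set.ofList (row.filter (fun v => v ≠ ".")))
        (PySem.Set.ofList (col.filter (fun v => v ≠ "."))) =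
      pvGoB d board idxs row col := by
  intro idxs
  induction idxs with
  | nil => intro row col _ _; rfl
  | cons i rest ih =>
    intro row col hrow hcol
    have hr := (pvHasDupes_false_iff row).mp hrow
    have hc := (pvHasDupes_false_iff col).mp hcol
    simp only [pvGoA, pvGoB]
    rw [← pvHasDupes_append row (pvCell board d i) hr,
      ← pvHasDupes_append col (pvCell board i d) hc]
    by_cases hdup : (pvHasDupes (row ++ [pvCell board d i]) ||
        pvHasDupes (col ++ [pvCell board i d])) = true
    · simp [hdup]
    · have h1 : pvHasDupes (row ++ [pvCell board d i]) = false := by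
        cases h : pvHasDupes (row ++ [pvCell board d i]); rfl; simp [h] at hdup
      have h2 : pvHasDupes (col ++ [pvCell board i d]) = false := by
        cases h : pvHasDupes (col ++ [pvCell board i d]); rfl; simp [h] at hdup
      simp only [h1, h2, Bool.or_false, if_false, Bool.false_eq_true]
      rw [← pvOfList_filter_append, ← pvOfList_filter_append]
      exact ih _ _ h1 h2

-- ===== VERDICT (by name: the statement is the Claim_ definition above) =====
theorem check_valid_diagonal_spec : Claim_equal_check_valid_diagonal := by
  intro d board _ _
  unfold Spec_check_valid_diagonal check_valid_diagonal check_valid_diagonal_alt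
  exact pvGoA_eq_goB d board _ [] [] rfl rfl
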